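-- pv_equiv track=rewrite | github.com/karenhaag/textmining2017 | clustering.py | dic_pos
-- ===== SOURCE A (Python) =====
-- def dic_pos(word_pos):
--     d = {}
--     l_d = []
--     for w in word_pos.keys():
--         if d.get(word_pos.get(w),"a") == "a":
--             lend = len(d)
--             d[word_pos.get(w)] = lend
--             l_d.append(word_pos.get(w))
--     lend = len(d)
--     d["[start]"] = lend
--     d["[end]"] = lend+1
--     return(d,l_d)
-- ===== SOURCE B (Python) =====
-- def dic_pos(word_pos):
--     # Different algorithm: record each value's FIRST-occurrence position by
--     # sweeping the values backwards (later writes overwrite earlier ones),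
--     # then recover the first-seen order by SORTING the distinct values by
--     # that position; indices then come from enumerating the sorted list.
--     vals = list(word_pos.values())
--     first = {}
--     for i, v in reversed(list(enumerate(vals))):
--         first[v] = i
--     l_d = sorted(first, key=first.get)
--     d = {v: i for i, v in enumerate(l_d)}
--     d["[start]"] = len(l_d)
--     d["[end]"] = len(l_d) + 1
--     return (d, l_d)
-- ===== Notes on version B (the rewrite author's own statement) =====
-- stated objective: alternative
-- what changed: A's single forward loop that dedups values and assigns indices on the fly is replaced by a backward sweep recording each value's first-occurrence position, a sort of the distinct values by that position to recover first-seen order, and an enumerate pass assigning indices.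
import Mathlib
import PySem

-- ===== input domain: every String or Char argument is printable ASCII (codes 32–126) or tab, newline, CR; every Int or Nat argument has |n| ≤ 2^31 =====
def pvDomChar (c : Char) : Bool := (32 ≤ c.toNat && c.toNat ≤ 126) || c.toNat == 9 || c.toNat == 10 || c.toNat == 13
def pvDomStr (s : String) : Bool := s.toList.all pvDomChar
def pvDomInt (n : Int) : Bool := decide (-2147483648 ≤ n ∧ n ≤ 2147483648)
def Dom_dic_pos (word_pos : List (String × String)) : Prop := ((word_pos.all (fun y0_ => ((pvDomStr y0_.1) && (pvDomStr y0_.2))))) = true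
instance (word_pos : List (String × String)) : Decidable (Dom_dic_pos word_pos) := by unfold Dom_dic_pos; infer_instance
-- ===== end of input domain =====

-- B replaces A's on-the-fly dedup-and-index loop by a backward first-occurrence
-- sweep followed by a sort by first position (alternative algorithm; same result).

-- ===== PORT A =====
-- A's loop body: 'if d.get(word_pos.get(w),"a") == "a"'. d's values are ints,
-- never the string "a", so the test holds exactly when the value is absent from
-- d: ported as a match on get? (none = absent). word_pos.get(w) with w drawn
-- from word_pos.keys() always returns a value; ported with '.getD ""' for
-- totality (never the default under Pre_, where keys are unique).
def dicPosStepA (acc : PySem.Dict String Int × List String) (v : String) :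
    PySem.Dict String Int × List String :=
  match acc.1.get? v with
  | some _ => acc
  | none =>
    let lend : Int := PySem.Dict.size acc.1
    (acc.1.insert v lend, acc.2 ++ [v])

def dic_pos (word_pos : List (String × String)) : (List (String × Int)) × List String :=
  let wp : PySem.Dict String String := PySem.Dict.mk word_pos
  let st := (PySem.Dict.keys wp).foldl
    (fun acc w => dicPosStepA acc ((PySem.Dict.get? wp w).getD "")) (PySem.Dict.empty, [])
  let lend : Int := PySem.Dict.size st.1
  let d := (st.1.insert "[start]" lend).insert "[end]" (lend + 1)
  (d.items, st.2)

-- ===== PORT B =====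
-- 'first.get(v)' (never missing for keys of first) is totalized as '.getD 0'.
def dic_pos_alt (word_pos : List (String × String)) : (List (String × Int)) × List String :=
  let wp : PySem.Dict String String := PySem.Dict.mk word_pos
  let vals := PySem.Dict.values wp
  let first : PySem.Dict String Int :=
    ((PySem.List.enumerate vals).reverse).foldl (fun d p => d.insert p.2 p.1) PySem.Dict.empty
  let l_d := PySem.List.sorted (PySem.Dict.keys first) (fun v => (first.get? v).getD 0) false
  let d := (PySem.List.enumerate l_d).foldl
    (fun d p => d.insert p.2 p.1) PySem.Dict.empty
  let d := (d.insert "[start]" (l_d.length : Int)).insert "[end]" ((l_d.length : Int) + 1)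
  (d.items, l_d)

-- ===== PRECONDITION & SPEC =====
-- The Lean argument is the association list representing the Python dict
-- word_pos; a list with duplicate keys represents no Python dict (Lean's
-- first-match lookup and Python's last-write dict construction disagree there),
-- so Pre_ restricts to unique keys.
def Pre_dic_pos (word_pos : List (String × String)) : Prop :=
  (word_pos.map Prod.fst).Nodup
instance (word_pos : List (String × String)) : Decidable (Pre_dic_pos word_pos) := by
  unfold Pre_dic_pos; infer_instance

def pvWitness_dic_pos : (List (String × String)) :=
  [("dog", "NN"), ("runs", "VB"), ("cat", "NN")]

def Spec_dic_pos (word_pos : List (String × String)) (out : (List (String × Int)) × List String) : Prop := out = dic_pos_alt word_pos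
instance (word_pos : List (String × String)) (out : (List (String × Int)) × List String) : Decidable (Spec_dic_pos word_pos out) := by unfold Spec_dic_pos; infer_instance

-- ===== CLAIM (what is proved, stated in full; the proofs are below) =====
def Claim_equal_dic_pos : Prop := ∀ (word_pos : List (String × String)), Dom_dic_pos word_pos → Pre_dic_pos word_pos → Spec_dic_pos word_pos (dic_pos word_pos)

-- ===== LEMMAS AND PROOFS =====

-- the index dict built by enumerating a list
def dicPosDictOf (l : List String) : PySem.Dict String Int :=
  (PySem.List.enumerate l).foldl (fun d p => d.insert p.2 p.1) PySem.Dict.empty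

lemma dicPosDictOf_items (l : List String) (hl : l.Nodup) :
    (dicPosDictOf l).items = (PySem.List.enumerate l).map (fun p => (p.2, p.1)) := by
  unfold dicPosDictOf
  have h := PySem.Dict.items_foldl_insert_fresh (PySem.List.enumerate l)
    (fun p => p.2) (fun p => p.1) PySem.Dict.empty
    (by intro a _; simp [PySem.Dict.contains_empty])
    (by rw [PySem.List.map_snd_enumerate]; exact hl)
  simpa [PySem.Dict.items] using h

lemma dicPosDictOf_size (l : List String) (hl : l.Nodup) :
    (dicPosDictOf l).size = l.length := by
  simp [PySem.Dict.size, dicPosDictOf_items l hl, PySem.List.length_enumerate]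

lemma dicPosDictOf_get?_none (l : List String) (hl : l.Nodup) (v : String) :
    (dicPosDictOf l).get? v = none ↔ v ∉ l := by
  rw [PySem.Dict.get?_eq_none_iff_not_mem_keys]
  have : (dicPosDictOf l).keys = l := by
    show (dicPosDictOf l).items.map Prod.fst = l
    rw [dicPosDictOf_items l hl, List.map_map]
    exact PySem.List.map_snd_enumerate l 0
  rw [this]

lemma dicPosDictOf_append (l : List String) (v : String) :
    dicPosDictOf (l ++ [v]) = (dicPosDictOf l).insert v (l.length : Int) := by
  unfold dicPosDictOf
  rw [PySem.List.enumerate_append, List.foldl_append]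
  simp [PySem.List.enumerate]

-- A's loop, started from the state B would build for the already-seen list l,
-- ends in the corresponding state for l extended with the fresh elements of vs.
lemma dicPos_loop_inv (vs : List String) (l : List String) (hl : l.Nodup) :
    vs.foldl dicPosStepA (dicPosDictOf l, l) =
      (dicPosDictOf (PySem.Set.update l vs), PySem.Set.update l vs) := by
  induction vs generalizing l with
  | nil => simp [PySem.Set.update_nil]
  | cons v vs ih =>
    rw [List.foldl_cons, PySem.Set.update_cons]
    by_cases hv : v ∈ l
    · have hstep : dicPosStepA (dicPosDictOf l, l) v = (dicPosDictOf l, l) := by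
        unfold dicPosStepA
        have : (dicPosDictOf l).get? v ≠ none := by
          rw [Ne, dicPosDictOf_get?_none l hl v]; simpa using hv
        cases h : (dicPosDictOf l).get? v with
        | none => exact absurd h this
        | some _ => rfl
      rw [hstep, PySem.Set.add_of_mem hv]
      exact ih l hl
    · have hstep : dicPosStepA (dicPosDictOf l, l) v =
          (dicPosDictOf (l ++ [v]), l ++ [v]) := by
        unfold dicPosStepA
        have h : (dicPosDictOf l).get? v = none := (dicPosDictOf_get?_none l hl v).mpr hv
        rw [h]
        simp [dicPosDictOf_append, dicPosDictOf_size l hl]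
      rw [hstep, PySem.Set.add_of_not_mem hv]
      refine ih (l ++ [v]) ?_
      rw [← List.concat_eq_append]
      exact List.Nodup.concat hv hl

-- under unique keys, A's per-key lookup returns the paired value
lemma dicPos_fold_keys (word_pos : List (String × String))
    (hnd : (word_pos.map Prod.fst).Nodup) :
    (PySem.Dict.keys (PySem.Dict.mk word_pos)).foldl
        (fun acc w => dicPosStepA acc ((PySem.Dict.get? (PySem.Dict.mk word_pos) w).getD ""))
        (PySem.Dict.empty, []) =
      (word_pos.map Prod.snd).foldl dicPosStepA (PySem.Dict.empty, []) := by
  have hkeys : PySem.Dict.keys (PySem.Dict.mk word_pos) = word_pos.map Prod.fst := by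
    simp [PySem.Dict.keys]
  rw [hkeys, List.foldl_map, List.foldl_map]
  apply PySem.List.foldl_congr_mem
  intro acc p hp
  have hget : (PySem.Dict.mk word_pos).get? p.1 = some p.2 := by
    apply PySem.Dict.get?_of_mem_items
    · simpa [PySem.Dict.items] using hp
    · simpa [PySem.Dict.keys, PySem.Dict.items] using hnd
  rw [hget]
  rfl

-- B's backward sweep: the dict of first-occurrence positions
def dicPosFirst (vals : List String) : PySem.Dict String Int :=
  ((PySem.List.enumerate vals).reverse).foldl (fun d p => d.insert p.2 p.1) PySem.Dict.empty

-- a right-to-left insertion fold looks up to the FIRST matching pair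
lemma dicPos_get?_foldl_rev (l : List (Int × String)) (d : PySem.Dict String Int) (v : String) :
    (l.reverse.foldl (fun d p => d.insert p.2 p.1) d).get? v =
      (match l.find? (fun p => p.2 == v) with
       | some p => some p.1
       | none => d.get? v) := by
  induction l generalizing d with
  | nil => simp
  | cons p l ih =>
    rw [List.reverse_cons, List.foldl_append]
    by_cases h : p.2 = v
    · simp [h, PySem.Dict.get?_insert_self]
    · rw [List.foldl_cons, List.foldl_nil,
        PySem.Dict.get?_insert_of_ne _ _ (Ne.symm h), ih d]
      have hb : (p.2 == v) = false := by simp [h]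
      simp [hb]

lemma dicPos_find?_enumerate (vals : List String) (v : String) (s : Int) :
    (PySem.List.enumerate vals s).find? (fun p => p.2 == v) =
      (PySem.List.index? vals v).map (fun k => ((s + (k : Int)), v)) := by
  induction vals generalizing s with
  | nil => simp [PySem.List.enumerate]
  | cons x xs ih =>
    rw [PySem.List.enumerate_cons, List.find?_cons]
    by_cases h : x = v
    · subst h
      rw [PySem.List.index?_cons_self]
      simp
    · have hb : (x == v) = false := by simp [h]
      rw [PySem.List.index?_cons_of_ne xs h]
      cases hx : List.idxOf? v xs with
      | none => simp [hb, ih (s + 1), PySem.List.index?_eq_idxOf?, hx]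
      | some k =>
        simp [hb, ih (s + 1), PySem.List.index?_eq_idxOf?, hx]
        ring

lemma dicPosFirst_get? (vals : List String) (v : String) :
    (dicPosFirst vals).get? v = (PySem.List.index? vals v).map (fun k => (k : Int)) := by
  unfold dicPosFirst
  rw [dicPos_get?_foldl_rev, dicPos_find?_enumerate vals v 0]
  cases PySem.List.index? vals v <;> simp

lemma dicPosFirst_keys (vals : List String) :
    (dicPosFirst vals).keys = PySem.Set.ofList vals.reverse := by
  unfold dicPosFirst
  rw [PySem.Dict.keys_foldl_insert_key ((PySem.List.enumerate vals).reverse) (fun p => p.2)]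
  have : ((PySem.List.enumerate vals).reverse.map (fun p => p.2)) = vals.reverse := by
    rw [List.map_reverse, PySem.List.map_snd_enumerate]
  rw [this]
  simp [PySem.Dict.keys, PySem.Dict.empty, PySem.Set.update_nil_left]

-- first-seen dedup is strictly increasing in first-occurrence index
lemma dicPos_pairwise_index (xs : List String) :
    (PySem.Set.ofList xs).Pairwise
      (fun a b => (PySem.List.index? xs a).getD 0 < (PySem.List.index? xs b).getD 0) := by
  induction xs using List.reverseRecOn with
  | nil => simp [PySem.Set.ofList]
  | append_singleton xs x ih =>
    rw [PySem.Set.ofList_append_singleton]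
    by_cases hx : x ∈ PySem.Set.ofList xs
    · rw [PySem.Set.add_of_mem hx]
      refine ih.imp_of_mem ?_
      intro a b ha hb hab
      have ha' : a ∈ xs := (PySem.Set.mem_ofList _ _).1 ha
      have hb' : b ∈ xs := (PySem.Set.mem_ofList _ _).1 hb
      rwa [PySem.List.index?_append_of_mem [x] ha', PySem.List.index?_append_of_mem [x] hb']
    · have hx' : x ∉ xs := fun h => hx ((PySem.Set.mem_ofList _ _).2 h)
      rw [PySem.Set.add_of_not_mem hx]
      rw [List.pairwise_append]
      refine ⟨ih.imp_of_mem ?_, List.pairwise_singleton _ _, ?_⟩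
      · intro a b ha hb hab
        have ha' : a ∈ xs := (PySem.Set.mem_ofList _ _).1 ha
        have hb' : b ∈ xs := (PySem.Set.mem_ofList _ _).1 hb
        rwa [PySem.List.index?_append_of_mem [x] ha', PySem.List.index?_append_of_mem [x] hb']
      · intro a ha b hb
        rw [List.mem_singleton] at hb
        rw [hb]
        have ha' : a ∈ xs := (PySem.Set.mem_ofList _ _).1 ha
        rw [PySem.List.index?_append_of_mem [x] ha',
            PySem.List.index?_append_singleton_self xs x hx']
        obtain ⟨k, hk⟩ := Option.isSome_iff_exists.1 ((PySem.List.index?_isSome_iff xs a).2 ha')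
        obtain ⟨hlt, -, -⟩ := PySem.List.getElem_of_index?_eq_some hk
        rw [hk]
        simpa using hlt

-- B's sorted list is exactly the first-seen dedup of the values
lemma dicPos_sorted_eq (vals : List String) :
    PySem.List.sorted ((dicPosFirst vals).keys)
        (fun v => ((dicPosFirst vals).get? v).getD 0) false =
      PySem.Set.ofList vals := by
  apply PySem.List.sorted_eq_of_perm_of_pairwise_lt
  · rw [dicPosFirst_keys]
    rw [List.perm_ext_iff_of_nodup (PySem.Set.nodup_ofList _) (PySem.Set.nodup_ofList _)]
    intro a
    simp [PySem.Set.mem_ofList]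
  · refine (dicPos_pairwise_index vals).imp_of_mem ?_
    intro a b ha hb hab
    have ha' : a ∈ vals := (PySem.Set.mem_ofList _ _).1 ha
    have hb' : b ∈ vals := (PySem.Set.mem_ofList _ _).1 hb
    obtain ⟨ka, hka⟩ := Option.isSome_iff_exists.1 ((PySem.List.index?_isSome_iff vals a).2 ha')
    obtain ⟨kb, hkb⟩ := Option.isSome_iff_exists.1 ((PySem.List.index?_isSome_iff vals b).2 hb')
    rw [dicPosFirst_get?, dicPosFirst_get?, hka, hkb]
    rw [hka, hkb] at hab
    simpa using hab

-- ===== VERDICT (by name: the statement is the Claim_ definition above) =====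
theorem dic_pos_spec : Claim_equal_dic_pos := by
  intro word_pos _ hpre
  unfold Spec_dic_pos dic_pos dic_pos_alt
  dsimp only
  rw [dicPos_fold_keys word_pos hpre]
  have h0 : (PySem.Dict.empty, ([] : List String)) =
      (dicPosDictOf [], ([] : List String)) := by simp [dicPosDictOf, PySem.List.enumerate]
  rw [h0, dicPos_loop_inv (word_pos.map Prod.snd) [] List.nodup_nil,
      PySem.Set.update_nil_left]
  have hvals : PySem.Dict.values (PySem.Dict.mk word_pos) = word_pos.map Prod.snd := by
    simp [PySem.Dict.values]
  simp only [hvals]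
  rw [show ((PySem.List.enumerate (word_pos.map Prod.snd)).reverse).foldl
        (fun d p => d.insert p.2 p.1) PySem.Dict.empty = dicPosFirst (word_pos.map Prod.snd) from rfl,
      dicPos_sorted_eq (word_pos.map Prod.snd)]
  rw [show (List.foldl (fun d p => d.insert p.2 p.1) PySem.Dict.empty
        (PySem.List.enumerate (PySem.Set.ofList (word_pos.map Prod.snd)))) =
      dicPosDictOf (PySem.Set.ofList (word_pos.map Prod.snd)) from rfl,
    dicPosDictOf_size _ (PySem.Set.nodup_ofList _)]
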